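-- pv_equiv track=rewrite | github.com/didriksi/FYS-STK3155_project2 | python/helpers.py | listify_dict_values
-- ===== SOURCE A (Python) =====
-- def listify_dict_values(dicts):
--     key_values = {}
--     for dictionary in dicts:
--         for key, value in dictionary.items():
--             if key in key_values:
--                 if value not in key_values[key]:
--                     key_values[key].append(value)
--             else:
--                 key_values[key] = [value]
--     return key_values
-- ===== SOURCE B (Python) =====
-- def listify_dict_values(dicts):
--     # Phase 1: gather ALL values per key (duplicates included), preserving first-seen key order.
--     grouped = {}
--     for dictionary in dicts:
--         for key, value in dictionary.items():
--             grouped.setdefault(key, []).append(value)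
--     # Phase 2: deduplicate each value list with an order-preserving membership scan.
--     result = {}
--     for key, values in grouped.items():
--         unique = []
--         for v in values:
--             if v not in unique:
--                 unique.append(v)
--         result[key] = unique
--     return result
-- ===== Notes on version B (the rewrite author's own statement) =====
-- stated objective: alternative
-- what changed: Replaces A's single interleaved group-and-dedup loop (membership test against the growing per-key result list on every insertion) by a two-phase decomposition: first collect every value per key with setdefault/append, then rebuild each list uniquified in a separate pass.
import Mathlib
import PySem

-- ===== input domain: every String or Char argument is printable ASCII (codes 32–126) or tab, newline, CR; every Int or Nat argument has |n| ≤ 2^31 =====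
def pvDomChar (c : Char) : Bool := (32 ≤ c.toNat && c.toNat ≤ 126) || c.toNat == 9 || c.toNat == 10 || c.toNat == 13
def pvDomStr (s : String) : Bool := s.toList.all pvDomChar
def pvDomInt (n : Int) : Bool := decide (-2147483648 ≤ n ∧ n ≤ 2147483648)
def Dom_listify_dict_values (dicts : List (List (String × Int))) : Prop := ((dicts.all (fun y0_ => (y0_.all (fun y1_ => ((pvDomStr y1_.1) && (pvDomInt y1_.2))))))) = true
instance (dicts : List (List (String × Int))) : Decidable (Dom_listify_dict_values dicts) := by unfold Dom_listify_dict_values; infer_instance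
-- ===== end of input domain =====

-- B is an alternative decomposition of A (group everything first, dedup afterwards); same return value.

-- ===== PORT A =====
-- Single interleaved loop: membership-test against the growing per-key list on every value.
def listify_dict_values (dicts : List (List (String × Int))) : List (String × List Int) :=
  (dicts.foldl (fun kv d =>
      d.foldl (fun kv p =>
        if kv.contains p.1 then
          if (kv.getD p.1 []).contains p.2 then kv
          else kv.modify p.1 [] (· ++ [p.2])
        else kv.insert p.1 [p.2]) kv)
    PySem.Dict.empty).items

-- ===== PORT B =====
-- Inner dedup loop of B's phase 2: scan a fresh `unique` list, append if absent.
def pvUnique (vs : List Int) : List Int :=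
  vs.foldl (fun u v => if u.contains v then u else u ++ [v]) []

def listify_dict_values_alt (dicts : List (List (String × Int))) : List (String × List Int) :=
  -- Phase 1: grouped.setdefault(key, []).append(value)
  let grouped := dicts.foldl (fun g d =>
      d.foldl (fun g p => g.modify p.1 [] (· ++ [p.2])) g) PySem.Dict.empty
  -- Phase 2: result[key] = unique
  (grouped.items.foldl (fun r p => r.insert p.1 (pvUnique p.2)) PySem.Dict.empty).items

-- ===== PRECONDITION & SPEC =====
def Spec_listify_dict_values (dicts : List (List (String × Int))) (out : List (String × List Int)) : Prop := out = listify_dict_values_alt dicts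
instance (dicts : List (List (String × Int))) (out : List (String × List Int)) : Decidable (Spec_listify_dict_values dicts out) := by unfold Spec_listify_dict_values; infer_instance

-- ===== CLAIM (what is proved, stated in full; the proofs are below) =====
def Claim_equal_listify_dict_values : Prop := ∀ (dicts : List (List (String × Int))), Dom_listify_dict_values dicts → Spec_listify_dict_values dicts (listify_dict_values dicts)

-- ===== LEMMAS AND PROOFS =====

-- abbreviate the two step functions
def pvStepA (kv : PySem.Dict String (List Int)) (p : String × Int) : PySem.Dict String (List Int) :=
  if kv.contains p.1 then
    if (kv.getD p.1 []).contains p.2 then kv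
    else kv.modify p.1 [] (· ++ [p.2])
  else kv.insert p.1 [p.2]

def pvStepB (g : PySem.Dict String (List Int)) (p : String × Int) : PySem.Dict String (List Int) :=
  g.modify p.1 [] (· ++ [p.2])

def pvF (p : String × List Int) : String × List Int := (p.1, pvUnique p.2)

-- nested fold = fold over the flattened pair list
theorem pv_flatten (dicts : List (List (String × Int)))
    (step : PySem.Dict String (List Int) → (String × Int) → PySem.Dict String (List Int))
    (init : PySem.Dict String (List Int)) :
    dicts.foldl (fun s d => d.foldl step s) init = (dicts.flatMap id).foldl step init := by
  induction dicts generalizing init with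
  | nil => rfl
  | cons d ds ih => simp [List.foldl_append, ih]

theorem pv_mem_unique_aux (vs acc : List Int) (x : Int) :
    x ∈ vs.foldl (fun u v => if u.contains v then u else u ++ [v]) acc ↔ x ∈ acc ∨ x ∈ vs := by
  induction vs generalizing acc with
  | nil => simp
  | cons v vs ih =>
    simp only [List.foldl_cons]
    by_cases h : v ∈ acc
    · rw [if_pos (by simpa using h), ih]
      constructor
      · rintro (hx | hx)
        exacts [Or.inl hx, Or.inr (List.mem_cons_of_mem v hx)]
      · rintro (hx | hx)
        · exact Or.inl hx
        · rcases List.mem_cons.mp hx with hx | hx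
          exacts [Or.inl (hx ▸ h), Or.inr hx]
    · rw [if_neg (by simpa using h), ih]
      simp only [List.mem_append, List.mem_cons]
      tauto

theorem pv_mem_unique (vs : List Int) (x : Int) : x ∈ pvUnique vs ↔ x ∈ vs := by
  simpa [pvUnique] using pv_mem_unique_aux vs [] x

theorem pv_unique_snoc (vs : List Int) (v : Int) :
    pvUnique (vs ++ [v]) = if v ∈ vs then pvUnique vs else pvUnique vs ++ [v] := by
  have : pvUnique (vs ++ [v]) =
      if (pvUnique vs).contains v then pvUnique vs else pvUnique vs ++ [v] := by
    simp [pvUnique, List.foldl_append]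
  rw [this]
  simp [pv_mem_unique]

-- one step of A on the image dict = image of one step of B
theorem pv_contains_map (g : PySem.Dict String (List Int)) (k : String) :
    (PySem.Dict.mk (g.items.map pvF)).contains k = g.contains k := by
  simp only [PySem.Dict.contains, List.any_map]
  rfl

theorem pv_get?_map (g : PySem.Dict String (List Int)) (k : String) :
    (PySem.Dict.mk (g.items.map pvF)).get? k = (g.get? k).map pvUnique := by
  simp only [PySem.Dict.get?, List.find?_map, Option.map_map]
  rfl

theorem pv_getD_map (g : PySem.Dict String (List Int)) (k : String) :
    (PySem.Dict.mk (g.items.map pvF)).getD k [] = pvUnique (g.getD k []) := by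
  simp only [PySem.Dict.getD, pv_get?_map]
  cases g.get? k <;> simp [pvUnique]

theorem pv_step (g : PySem.Dict String (List Int)) (hnd : g.keys.Nodup) (p : String × Int) :
    pvStepA (PySem.Dict.mk (g.items.map pvF)) p = PySem.Dict.mk ((pvStepB g p).items.map pvF) := by
  obtain ⟨k, v⟩ := p
  simp only [pvStepA, pvStepB, PySem.Dict.modify]
  by_cases hc : g.contains k = true
  · rw [pv_contains_map, if_pos hc, pv_getD_map]
    set vs := g.getD k [] with hvs
    by_cases hv : v ∈ vs
    · rw [if_pos (by simpa [pv_mem_unique] using hv)]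
      rw [PySem.Dict.items_insert_of_contains _ _ hc]
      apply PySem.Dict.ext
      simp only [List.map_map]
      refine (List.map_congr_left ?_).symm
      intro q hq
      by_cases hqk : (q.1 == k) = true
      · have hk : q.1 = k := by simpa using hqk
        have : g.get? q.1 = some q.2 := PySem.Dict.get?_of_mem_items g (by simpa using hq) hnd
        have hq2 : q.2 = vs := by
          rw [hvs, PySem.Dict.getD_eq_get?_getD, ← hk, this]; rfl
        simp [Function.comp, pvF, pv_unique_snoc, hv, hq2, hk]
      · simp [Function.comp, hqk, pvF]
    · rw [if_neg (by simpa [pv_mem_unique] using hv)]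
      rw [PySem.Dict.items_insert_of_contains _ _ hc]
      have hcF : (PySem.Dict.mk (g.items.map pvF)).contains k = true := by rw [pv_contains_map]; exact hc
      apply PySem.Dict.ext
      rw [PySem.Dict.items_insert_of_contains _ _ hcF]
      simp only [List.map_map]
      refine List.map_congr_left ?_
      intro q hq
      by_cases hqk : (q.1 == k) = true
      · simp [Function.comp, pvF, hqk, pv_unique_snoc, hv]
      · simp [Function.comp, pvF, hqk]
  · rw [pv_contains_map, if_neg hc]
    have hg : g.getD k [] = [] := PySem.Dict.getD_of_not_contains g [] (by simpa using hc)
    have hcF : (PySem.Dict.mk (g.items.map pvF)).contains k = false := by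
      rw [pv_contains_map]; simpa using hc
    apply PySem.Dict.ext
    rw [PySem.Dict.items_insert_of_not_contains _ _ hcF,
        hg, PySem.Dict.items_insert_of_not_contains _ _ (by simpa using hc)]
    simp [pvF, pvUnique]

theorem pv_nodup_step (g : PySem.Dict String (List Int)) (hnd : g.keys.Nodup) (p : String × Int) :
    (pvStepB g p).keys.Nodup := by
  simpa [pvStepB, PySem.Dict.modify] using PySem.Dict.nodup_keys_insert g p.1 _ hnd

-- the invariant carried through the whole flattened pair list
theorem pv_invariant (ps : List (String × Int)) (g : PySem.Dict String (List Int))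
    (hnd : g.keys.Nodup) :
    ps.foldl pvStepA (PySem.Dict.mk (g.items.map pvF)) =
      PySem.Dict.mk ((ps.foldl pvStepB g).items.map pvF) := by
  induction ps generalizing g with
  | nil => rfl
  | cons p ps ih =>
    simp only [List.foldl_cons, pv_step g hnd p]
    exact ih (pvStepB g p) (pv_nodup_step g hnd p)

theorem pv_nodup_fold (ps : List (String × Int)) (g : PySem.Dict String (List Int))
    (hnd : g.keys.Nodup) : (ps.foldl pvStepB g).keys.Nodup := by
  induction ps generalizing g with
  | nil => exact hnd
  | cons p ps ih => exact ih (pvStepB g p) (pv_nodup_step g hnd p)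

-- ===== VERDICT (by name: the statement is the Claim_ definition above) =====
theorem listify_dict_values_spec : Claim_equal_listify_dict_values := by
  intro dicts _
  unfold Spec_listify_dict_values listify_dict_values listify_dict_values_alt
  rw [pv_flatten, pv_flatten]
  set ps := dicts.flatMap id with hps
  have hA : ps.foldl (fun kv p =>
      if kv.contains p.1 then
        if (kv.getD p.1 []).contains p.2 then kv
        else kv.modify p.1 [] (· ++ [p.2])
      else kv.insert p.1 [p.2]) PySem.Dict.empty = ps.foldl pvStepA PySem.Dict.empty := rfl
  have hG : ps.foldl (fun g p => g.modify p.1 [] (· ++ [p.2])) PySem.Dict.empty =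
      ps.foldl pvStepB PySem.Dict.empty := rfl
  rw [hA, hG]
  have hinv := pv_invariant ps PySem.Dict.empty PySem.Dict.nodup_keys_empty
  have hempty : PySem.Dict.mk ((PySem.Dict.empty (κ := String) (ν := List Int)).items.map pvF) =
      PySem.Dict.empty := rfl
  rw [hempty] at hinv
  rw [hinv]
  set grouped := ps.foldl pvStepB PySem.Dict.empty with hgrouped
  have hndg : grouped.keys.Nodup := pv_nodup_fold ps PySem.Dict.empty PySem.Dict.nodup_keys_empty
  rw [PySem.Dict.items_foldl_insert_fresh grouped.items (fun p => p.1) (fun p => pvUnique p.2)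
        PySem.Dict.empty (fun a _ => PySem.Dict.contains_empty a.1) hndg]
  rfl
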